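-- pv_equiv track=rewrite | github.com/hhebb/algorithm | week_5/풍선 터뜨리기.py | solution
-- ===== SOURCE A (Python) =====
-- def solution(a):
--     if len(a) <= 2:
--         return 2
--
--     answer = 0
--     left, right = a[0], a[-1]
--
--     for i in range(len(a)):
--         if a[i] < left:
--             left = a[i]
--             answer += 1
--         if a[len(a) - i - 1] < right:
--             right = a[len(a) - i - 1]
--             answer += 1
--
--     answer += 1
--     return answer
-- ===== SOURCE B (Python) =====
-- def solution(a):
--     if len(a) <= 2:
--         return 2
--
--     def records(xs):
--         # brute-force definition: position i is a "record" iff xs[i] is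
--         # strictly smaller than every element before it
--         return sum(1 for i in range(1, len(xs))
--                    if all(xs[i] < xs[j] for j in range(i)))
--
--     return records(a) + records(a[::-1]) + 1
-- ===== Notes on version B (the rewrite author's own statement) =====
-- stated objective: alternative
-- what changed: Replaces A's single interleaved two-pointer scan with mutable running-min/counter state by the direct brute-force definition: an index counts iff it is strictly smaller than every element before it (checked with an inner all-pairs scan), applied to the list and its reversal, plus one.
import Mathlib
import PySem

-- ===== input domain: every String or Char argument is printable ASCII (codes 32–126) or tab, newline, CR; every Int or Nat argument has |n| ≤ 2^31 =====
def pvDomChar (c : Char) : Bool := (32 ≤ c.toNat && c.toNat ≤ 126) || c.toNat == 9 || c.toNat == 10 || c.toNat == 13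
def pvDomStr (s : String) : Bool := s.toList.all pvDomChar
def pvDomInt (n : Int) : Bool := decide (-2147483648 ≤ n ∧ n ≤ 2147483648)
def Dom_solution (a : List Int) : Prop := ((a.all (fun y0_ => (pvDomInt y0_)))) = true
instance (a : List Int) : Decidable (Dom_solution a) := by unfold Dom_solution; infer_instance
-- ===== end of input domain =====

-- B replaces A's interleaved two-pointer scan with running state by the direct brute-force definition (an index counts iff strictly below every earlier element, all-pairs check) over the list and its reversal; alternative decomposition, not faster.


-- ===== PORT A =====
-- a[0], a[-1], a[i], a[len(a)-i-1] are always in range under the length guard, so pyGetD is exact here.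
def solution (a : List Int) : Int :=
  if a.length ≤ 2 then 2
  else
    ((PySem.List.pyRange 0 (a.length : Int) 1).foldl
      (fun (st : Int × Int × Int) i =>
        let st1 := if PySem.List.pyGetD a i 0 < st.2.1
          then (st.1 + 1, PySem.List.pyGetD a i 0, st.2.2) else st
        if PySem.List.pyGetD a ((a.length : Int) - i - 1) 0 < st1.2.2
          then (st1.1 + 1, st1.2.1, PySem.List.pyGetD a ((a.length : Int) - i - 1) 0) else st1)
      (0, PySem.List.pyGetD a 0 0, PySem.List.pyGetD a (-1) 0)).1 + 1

-- ===== PORT B =====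
-- sum(1 for i in range(1, len(xs)) if all(xs[i] < xs[j] for j in range(i))):
-- xs[i], xs[j] are in range for these indices, so pyGetD is exact.
def records (xs : List Int) : Int :=
  ((PySem.List.pyRange 1 (xs.length : Int) 1).map (fun i =>
      if (PySem.List.pyRange 0 i 1).all
          (fun j => decide (PySem.List.pyGetD xs i 0 < PySem.List.pyGetD xs j 0))
        then (1 : Int) else 0)).sum

-- a[::-1] ported via PySem.List.slice?; step -1 never raises, so getD [] is exact.
def solution_alt (a : List Int) : Int :=
  if a.length ≤ 2 then 2
  else records a + records ((PySem.List.slice? a none none (-1)).getD []) + 1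

-- ===== PRECONDITION & SPEC =====
def Spec_solution (a : List Int) (out : Int) : Prop := out = solution_alt a
instance (a : List Int) (out : Int) : Decidable (Spec_solution a out) := by unfold Spec_solution; infer_instance

-- ===== CLAIM (what is proved, stated in full; the proofs are below) =====
def Claim_equal_solution : Prop := ∀ (a : List Int), Dom_solution a → Spec_solution a (solution a)

-- ===== LEMMAS AND PROOFS =====

-- the common value of both counts: strict-record count below a running bound m
def recAux (m : Int) : List Int → Int
  | [] => 0
  | x :: t => (if x < m then 1 else 0) + recAux (min m x) t

-- A's per-iteration body, expressed on the pair (a[i], a[len-1-i])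
def stepPair (st : Int × Int × Int) (xy : Int × Int) : Int × Int × Int :=
  let st1 := if xy.1 < st.2.1 then (st.1 + 1, xy.1, st.2.2) else st
  if xy.2 < st1.2.2 then (st1.1 + 1, st1.2.1, xy.2) else st1

theorem foldl_stepPair (zs : List (Int × Int)) : ∀ (ans l r : Int),
    (zs.foldl stepPair (ans, l, r)).1 =
      ans + recAux l (zs.map Prod.fst) + recAux r (zs.map Prod.snd) := by
  induction zs with
  | nil => intro ans l r; simp [recAux]
  | cons z t ih =>
    intro ans l r
    obtain ⟨x, y⟩ := z
    simp only [List.foldl_cons, List.map_cons, recAux]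
    have hstep : stepPair (ans, l, r) (x, y) =
        (ans + (if x < l then 1 else 0) + (if y < r then 1 else 0), min l x, min r y) := by
      by_cases hx : x < l <;> by_cases hy : y < r
      · simp [stepPair, hx, hy, min_eq_right hx.le, min_eq_right hy.le]
      · simp [stepPair, hx, hy, min_eq_right hx.le, min_eq_left (not_lt.1 hy)]
      · simp [stepPair, hx, hy, min_eq_left (not_lt.1 hx), min_eq_right hy.le]
      · simp [stepPair, hx, hy, min_eq_left (not_lt.1 hx), min_eq_left (not_lt.1 hy)]
    rw [hstep, ih]
    split_ifs <;> omega

-- the Nat-indexed brute-force condition: below every earlier element and below m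
def bfCond (t : List Int) (m : Int) (k : Nat) : Bool :=
  decide (t.getD k 0 < m) && (List.range k).all (fun j => decide (t.getD k 0 < t.getD j 0))

theorem bfCond_succ (y : Int) (u : List Int) (m : Int) :
    (bfCond (y :: u) m) ∘ Nat.succ = bfCond u (min m y) := by
  funext k
  simp only [Function.comp_apply, bfCond, List.getD_cons_succ, List.range_succ_eq_map,
    List.all_cons, List.all_map, Function.comp_def, List.getD_cons_zero]
  rw [Bool.eq_iff_iff]
  simp [and_assoc]

-- the Nat-indexed brute-force count equals the running-min record count
theorem countP_eq_recAux (t : List Int) : ∀ (m : Int),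
    ((List.countP (bfCond t m) (List.range t.length) : Nat) : Int) = recAux m t := by
  induction t with
  | nil => intro m; simp [recAux]
  | cons y u ih =>
    intro m
    rw [List.length_cons, List.range_succ_eq_map, List.countP_cons, List.countP_map,
      bfCond_succ]
    have h0 : bfCond (y :: u) m 0 = decide (y < m) := by simp [bfCond]
    rw [h0]
    by_cases hym : y < m <;>
      simp only [hym, decide_true, decide_false, if_true, if_false, recAux] <;>
      push_cast <;> rw [ih (min m y)] <;> omega

-- B's records on a nonempty list is the running-min record count from its head
theorem records_eq_recAux (x : Int) (t : List Int) :
    records (x :: t) = recAux x t := by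
  unfold records
  rw [PySem.List.sum_map_ite_one_zero]
  rw [PySem.List.pyRange_one, List.countP_map]
  have hlen : (((x :: t).length : Int) - 1).toNat = t.length := by
    simp
  rw [hlen]
  have hfun : ((fun i => (PySem.List.pyRange 0 i 1).all
        (fun j => decide (PySem.List.pyGetD (x :: t) i 0 < PySem.List.pyGetD (x :: t) j 0)))
        ∘ (fun k : Nat => (1 : Int) + ↑k)) = bfCond t x := by
    funext k
    simp only [Function.comp_apply]
    have hc : (1 : Int) + (k : Int) = ((k + 1 : Nat) : Int) := by push_cast; ring
    rw [hc]
    have hi : PySem.List.pyGetD (x :: t) ((k + 1 : Nat) : Int) 0 = t.getD k 0 := by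
      rw [PySem.List.pyGetD_natCast]
      simp
    rw [PySem.List.pyRange_one, List.all_map]
    have hj : ((fun j => decide (PySem.List.pyGetD (x :: t) ((k + 1 : Nat) : Int) 0
          < PySem.List.pyGetD (x :: t) j 0)) ∘ (fun j : Nat => (0 : Int) + ↑j)) =
        (fun j : Nat => decide (t.getD k 0 < (x :: t).getD j 0)) := by
      funext j
      simp only [Function.comp_apply, hi, zero_add]
      rw [PySem.List.pyGetD_natCast]
    rw [hj]
    have hrange : (((k + 1 : Nat) : Int) - 0).toNat = k + 1 := by simp
    rw [hrange, List.range_succ_eq_map]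
    simp only [bfCond, List.all_cons, List.all_map, Function.comp_def,
      List.getD_cons_succ, List.getD_cons_zero]
  rw [hfun]
  exact countP_eq_recAux t x

-- ===== VERDICT (by name: the statement is the Claim_ definition above) =====
theorem solution_spec : Claim_equal_solution := by
  intro a _
  unfold Spec_solution solution solution_alt
  by_cases hlen : a.length ≤ 2
  · simp [hlen]
  · rw [if_neg hlen, if_neg hlen, PySem.List.slice?_none_none_neg_one, Option.getD_some]
    have hne : a ≠ [] := by intro h; subst h; simp at hlen
    have hzlen : (a.zip a.reverse).length = a.length := by
      simp [List.length_zip]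
    have hcongr : ∀ (st : Int × Int × Int), ∀ i ∈ PySem.List.pyRange 0 (a.length : Int) 1,
        (let st1 := if PySem.List.pyGetD a i 0 < st.2.1
            then (st.1 + 1, PySem.List.pyGetD a i 0, st.2.2) else st
          if PySem.List.pyGetD a ((a.length : Int) - i - 1) 0 < st1.2.2
            then (st1.1 + 1, st1.2.1, PySem.List.pyGetD a ((a.length : Int) - i - 1) 0) else st1)
          = stepPair st (PySem.List.pyGetD (a.zip a.reverse) i (0, 0)) := by
      intro st i hi
      rw [PySem.List.mem_pyRange_one] at hi
      have hilt : i.toNat < a.length := by omega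
      have hzi : i < ((a.zip a.reverse).length : Int) := by rw [hzlen]; exact hi.2
      have h1 : PySem.List.pyGetD (a.zip a.reverse) i (0, 0)
          = (a.zip a.reverse)[i.toNat]'(by omega) :=
        PySem.List.pyGetD_eq_getElem _ _ hi.1 hzi
      have h2 : (a.zip a.reverse)[i.toNat]'(by omega) =
          (a[i.toNat]'hilt, a.reverse[i.toNat]'(by simpa using hilt)) := by
        simp
      have h3 : PySem.List.pyGetD a i 0 = a[i.toNat]'hilt :=
        PySem.List.pyGetD_eq_getElem _ _ hi.1 hi.2
      have h4 : PySem.List.pyGetD a ((a.length : Int) - i - 1) 0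
          = a.reverse[i.toNat]'(by simpa using hilt) := by
        rw [PySem.List.pyGetD_eq_getElem _ _ (by omega) (by omega)]
        rw [List.getElem_reverse]
        congr 1
        omega
      rw [h1, h2]
      simp only [stepPair, h3, h4]
    rw [PySem.List.foldl_congr_mem _ _ _ _ hcongr]
    rw [show (a.length : Int) = ((a.zip a.reverse).length : Int) from by rw [hzlen]]
    rw [PySem.List.foldl_pyRange_zero_pyGetD']
    rw [foldl_stepPair]
    rw [List.map_fst_zip (by simp), List.map_snd_zip (by simp)]
    obtain ⟨x, t, rfl⟩ : ∃ x t, a = x :: t := by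
      cases a with
      | nil => exact absurd rfl hne
      | cons x t => exact ⟨x, t, rfl⟩
    obtain ⟨r, s, hrev⟩ : ∃ r s, (x :: t).reverse = r :: s := by
      cases hx : (x :: t).reverse with
      | nil => exact absurd (List.reverse_eq_nil_iff.1 hx) (by simp)
      | cons r s => exact ⟨r, s, rfl⟩
    have hhead : PySem.List.pyGetD (x :: t) 0 0 = x := PySem.List.pyGetD_zero_cons x t 0
    have hlast : PySem.List.pyGetD (x :: t) (-1) 0 = r := by
      rw [PySem.List.pyGetD_neg_one (x :: t) 0 hne]
      have h1 : (x :: t).reverse.head? = some r := by rw [hrev]; rfl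
      rw [List.head?_reverse, List.getLast?_eq_some_getLast hne] at h1
      exact Option.some.inj h1
    rw [hrev, hhead, hlast, records_eq_recAux x t, records_eq_recAux r s]
    have hxx : recAux x (x :: t) = recAux x t := by simp [recAux]
    have hrr : recAux r (r :: s) = recAux r s := by simp [recAux]
    rw [hxx, hrr]
    omega
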